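-- pv_equiv track=rewrite | github.com/YuvalDellus/IntroToCS | ex5/ex5.py | create_basket_from_txt
-- ===== SOURCE A (Python) =====
-- ITEM_CODE_STYLE_LEFT = '['
--
-- ITEM_CODE_STYLE_RIGHT = ']'
--
-- def create_basket_from_txt(basket_txt):
--     '''
--     Receives text representation of few items (and maybe some garbage
--       at the edges)
--     Returns a basket- list of ItemCodes that were included in basket_txt
--
--     '''
--     numbers_list = list()
--     for (i, letter) in enumerate(basket_txt):
--         if letter == ITEM_CODE_STYLE_LEFT:
--             temp = basket_txt[i + 1:]  # getting the string without '['
--             for (i, letter) in enumerate(temp):  # running on new string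
--                 if letter == ITEM_CODE_STYLE_RIGHT:
--                     final = temp[:i]  # cutting the string without ']'
--                     numbers_list.append(final)  # saves the item code string
--                     break
--                 elif letter == ITEM_CODE_STYLE_LEFT:  # if we get '[' agian in
--                     #  a row, the user chose partial item code and we break
--                     break
--     return numbers_list
-- ===== SOURCE B (Python) =====
-- def create_basket_from_txt(basket_txt):
--     # Single left-to-right pass state machine: buf is None outside brackets,
--     # or the captured content since the most recent '['.
--     result = []
--     buf = None
--     for ch in basket_txt:
--         if buf is None:
--             if ch == '[':
--                 buf = ''
--         elif ch == ']':
--             result.append(buf)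
--             buf = None
--         elif ch == '[':
--             buf = ''
--         else:
--             buf += ch
--     return result
-- ===== Notes on version B (the rewrite author's own statement) =====
-- stated objective: alternative
-- what changed: A rescans the whole remaining suffix at every opening bracket (nested loops); B is a single left-to-right pass maintaining an optional capture buffer that resets on an opening bracket and emits on a closing bracket.
import Mathlib
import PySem

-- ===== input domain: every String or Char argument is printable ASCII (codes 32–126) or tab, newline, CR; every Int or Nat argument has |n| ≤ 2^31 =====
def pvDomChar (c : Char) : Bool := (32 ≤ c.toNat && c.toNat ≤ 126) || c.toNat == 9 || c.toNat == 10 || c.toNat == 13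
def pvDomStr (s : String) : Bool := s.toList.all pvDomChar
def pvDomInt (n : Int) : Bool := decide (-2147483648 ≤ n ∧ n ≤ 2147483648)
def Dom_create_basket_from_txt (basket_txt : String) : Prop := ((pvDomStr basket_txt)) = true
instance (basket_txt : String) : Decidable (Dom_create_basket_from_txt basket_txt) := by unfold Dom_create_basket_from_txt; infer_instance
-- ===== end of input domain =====

set_option maxRecDepth 4096


-- B replaces A's nested rescans (a fresh inner scan of the whole remaining suffix at every
-- opening bracket) with a single left-to-right pass maintaining an optional capture buffer.

-- ===== PORT A =====
-- inner loop of A: 'for (i, letter) in enumerate(temp): if ]: return temp[:i]; if [: break'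
def aInnerGo (temp : List Char) : List Char → Nat → Option (List Char)
  | [], _ => none
  | c :: cs, i =>
      if c = ']' then some (temp.take i)
      else if c = '[' then none
      else aInnerGo temp cs (i + 1)

def aInner (temp : List Char) : Option (List Char) := aInnerGo temp temp 0

-- outer loop of A: at each '[' at index i, scan temp = basket_txt[i+1:] (= the rest of the string)
def aOuter : List Char → List String → List String
  | [], acc => acc
  | c :: rest, acc =>
      if c = '[' then
        match aInner rest with
        | some final => aOuter rest (acc ++ [String.mk final])
        | none => aOuter rest acc
      else aOuter rest acc

def create_basket_from_txt (basket_txt : String) : List String :=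
  aOuter basket_txt.toList []

-- ===== PORT B =====
-- one pass; state: none = outside brackets, some buf = captured content since last '['
def bGo : List Char → Option (List Char) → List String
  | [], _ => []
  | c :: rest, none => if c = '[' then bGo rest (some []) else bGo rest none
  | c :: rest, some buf =>
      if c = ']' then String.mk buf :: bGo rest none
      else if c = '[' then bGo rest (some [])
      else bGo rest (some (buf ++ [c]))

def create_basket_from_txt_alt (basket_txt : String) : List String :=
  bGo basket_txt.toList none

-- ===== PRECONDITION & SPEC =====
def Spec_create_basket_from_txt (basket_txt : String) (out : List String) : Prop := out = create_basket_from_txt_alt basket_txt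
instance (basket_txt : String) (out : List String) : Decidable (Spec_create_basket_from_txt basket_txt out) := by unfold Spec_create_basket_from_txt; infer_instance

-- ===== CLAIM (what is proved, stated in full; the proofs are below) =====
def Claim_equal_create_basket_from_txt : Prop := ∀ (basket_txt : String), Dom_create_basket_from_txt basket_txt → Spec_create_basket_from_txt basket_txt (create_basket_from_txt basket_txt)

-- ===== LEMMAS AND PROOFS =====

-- reference form of A's inner scan: prefix up to the first ']', none if a '[' (or the end) comes first
def scanPfx : List Char → Option (List Char)
  | [] => none
  | c :: t =>
      if c = ']' then some []
      else if c = '[' then none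
      else (scanPfx t).map (c :: ·)

theorem aInnerGo_eq (temp : List Char) :
    ∀ (rest : List Char) (i : Nat), temp.drop i = rest →
      aInnerGo temp rest i = (scanPfx rest).map (fun p => temp.take i ++ p) := by
  intro rest
  induction rest with
  | nil => intro i _; simp [aInnerGo, scanPfx]
  | cons c cs ih =>
    intro i hd
    have hget : temp[i]? = some c := by
      have : (temp.drop i)[0]? = some c := by rw [hd]; simp
      simpa using this
    have htake : temp.take (i + 1) = temp.take i ++ [c] := by
      rw [List.take_succ, hget]; simp
    have hd' : temp.drop (i + 1) = cs := by
      have : (temp.drop i).drop 1 = cs := by rw [hd]; simp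
      simpa [List.drop_drop] using this
    by_cases h1 : c = ']'
    · simp [aInnerGo, scanPfx, h1]
    · by_cases h2 : c = '['
      · simp [aInnerGo, scanPfx, h1, h2]
      · rw [show aInnerGo temp (c :: cs) i = aInnerGo temp cs (i + 1) by
            simp [aInnerGo, h1, h2]]
        rw [ih (i + 1) hd']
        rw [show scanPfx (c :: cs) = (scanPfx cs).map (c :: ·) from by
              simp [scanPfx, h1, h2]]
        cases scanPfx cs with
        | none => simp
        | some p => simp [htake]

theorem aInner_eq (temp : List Char) : aInner temp = scanPfx temp := by
  have := aInnerGo_eq temp temp 0 (by simp)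
  simpa [aInner] using this

theorem aOuter_nil (acc : List String) : aOuter [] acc = acc := rfl

theorem aOuter_cons_some (c : Char) (t : List Char) (acc : List String) {f : List Char}
    (h : c = '[') (hs : aInner t = some f) :
    aOuter (c :: t) acc = aOuter t (acc ++ [String.mk f]) := by
  subst h
  conv_lhs => rw [aOuter]
  rw [hs]
  simp

theorem aOuter_cons_none (c : Char) (t : List Char) (acc : List String)
    (h : c = '[') (hs : aInner t = none) :
    aOuter (c :: t) acc = aOuter t acc := by
  subst h
  conv_lhs => rw [aOuter]
  rw [hs]
  simp

theorem aOuter_cons_other (c : Char) (t : List Char) (acc : List String)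
    (h : ¬ c = '[') : aOuter (c :: t) acc = aOuter t acc := by
  conv_lhs => rw [aOuter]
  simp [h]

theorem aOuter_acc (cs : List Char) : ∀ acc, aOuter cs acc = acc ++ aOuter cs [] := by
  induction cs with
  | nil => intro acc; simp [aOuter_nil]
  | cons c t ih =>
    intro acc
    by_cases h : c = '['
    · cases hs : aInner t with
      | none => rw [aOuter_cons_none c t acc h hs, aOuter_cons_none c t [] h hs, ih]
      | some final =>
        rw [aOuter_cons_some c t acc h hs, aOuter_cons_some c t [] h hs,
          ih (acc ++ [String.mk final]), ih ([] ++ [String.mk final])]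
        simp
    · rw [aOuter_cons_other c t acc h, aOuter_cons_other c t [] h, ih]

theorem main_lemma (cs : List Char) :
    (bGo cs none = aOuter cs []) ∧
    (∀ buf, bGo cs (some buf) =
      (match scanPfx cs with
       | some p => [String.mk (buf ++ p)]
       | none => []) ++ aOuter cs []) := by
  induction cs with
  | nil => exact ⟨rfl, fun buf => by simp [bGo, scanPfx, aOuter_nil]⟩
  | cons c t ih =>
    obtain ⟨ihP, ihQ⟩ := ih
    constructor
    · by_cases h : c = '['
      · rw [show bGo (c :: t) none = bGo t (some []) by simp [bGo, h]]
        rw [ihQ []]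
        cases hs : scanPfx t with
        | none => rw [aOuter_cons_none c t [] h (by rw [aInner_eq, hs])]; simp [hs]
        | some p =>
          rw [aOuter_cons_some c t [] h (by rw [aInner_eq, hs]),
            aOuter_acc t ([] ++ [String.mk p])]
          simp [hs]
      · rw [show bGo (c :: t) none = bGo t none by simp [bGo, h]]
        rw [ihP, aOuter_cons_other c t [] h]
    · intro buf
      by_cases h1 : c = ']'
      · rw [show bGo (c :: t) (some buf) = String.mk buf :: bGo t none by simp [bGo, h1]]
        rw [ihP]
        have h2 : ¬ c = '[' := by simp [h1]
        rw [aOuter_cons_other c t [] h2]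
        simp [scanPfx, h1]
      · by_cases h2 : c = '['
        · rw [show bGo (c :: t) (some buf) = bGo t (some []) by simp [bGo, h1, h2]]
          rw [ihQ []]
          cases hs : scanPfx t with
          | none =>
            rw [aOuter_cons_none c t [] h2 (by rw [aInner_eq, hs])]
            simp [scanPfx, h1, h2, hs]
          | some p =>
            rw [aOuter_cons_some c t [] h2 (by rw [aInner_eq, hs]),
              aOuter_acc t ([] ++ [String.mk p])]
            simp [scanPfx, h1, h2, hs]
        · rw [show bGo (c :: t) (some buf) = bGo t (some (buf ++ [c])) by
              simp [bGo, h1, h2]]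
          rw [ihQ (buf ++ [c])]
          rw [aOuter_cons_other c t [] h2]
          cases hs : scanPfx t with
          | none => simp [scanPfx, h1, h2, hs]
          | some p => simp [scanPfx, h1, h2, hs]

-- ===== VERDICT (by name: the statement is the Claim_ definition above) =====
theorem create_basket_from_txt_spec : Claim_equal_create_basket_from_txt := by
  intro s _
  unfold Spec_create_basket_from_txt create_basket_from_txt create_basket_from_txt_alt
  exact (main_lemma s.toList).1.symm
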